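-- pv_equiv track=rewrite | github.com/prof-fabiosantos/MultiLayerSieve | Algoritmo_main.py | peneira_multicamadas
-- ===== SOURCE A (Python) =====
-- def peneira_multicamadas(dados, thresholds):
--     classes = []
--     for valor in dados:
--         classificado = False
--         for i, limiar in enumerate(thresholds):
--             if valor < limiar:
--                 classes.append(i)
--                 classificado = True
--                 break
--         if not classificado:
--             classes.append(len(thresholds))
--     return classes
-- ===== SOURCE B (Python) =====
-- def peneira_multicamadas(dados, thresholds):
--     # class of v = first index i with v < thresholds[i] (else len) =
--     # number of running prefix-maxima <= v; the prefix-maxima list is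
--     # nondecreasing, so one binary search per value suffices.
--     pm = []
--     m = None
--     for t in thresholds:
--         m = t if m is None or t > m else m
--         pm.append(m)
--     n = len(pm)
--     res = []
--     for v in dados:
--         lo, hi = 0, n
--         while lo < hi:
--             mid = (lo + hi) // 2
--             if pm[mid] <= v:
--                 lo = mid + 1
--             else:
--                 hi = mid
--         res.append(lo)
--     return res
-- ===== Notes on version B (the rewrite author's own statement) =====
-- stated objective: faster
-- what changed: Replaces the per-value linear first-hit scan of thresholds with a one-time running-prefix-maxima pass plus a binary search (bisect_right on the nondecreasing maxima) per value.
import Mathlib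
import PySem

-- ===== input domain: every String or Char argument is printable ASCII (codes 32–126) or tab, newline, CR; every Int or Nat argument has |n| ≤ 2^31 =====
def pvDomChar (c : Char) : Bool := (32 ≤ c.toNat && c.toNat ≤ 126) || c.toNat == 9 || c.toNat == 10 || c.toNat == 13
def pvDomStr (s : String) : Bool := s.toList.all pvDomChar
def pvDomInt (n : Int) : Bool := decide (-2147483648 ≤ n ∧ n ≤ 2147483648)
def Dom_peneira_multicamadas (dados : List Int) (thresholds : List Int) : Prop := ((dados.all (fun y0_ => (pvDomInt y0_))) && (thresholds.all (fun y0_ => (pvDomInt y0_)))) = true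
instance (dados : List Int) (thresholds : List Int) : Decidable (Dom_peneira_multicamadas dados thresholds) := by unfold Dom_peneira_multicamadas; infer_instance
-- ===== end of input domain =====

-- B replaces A's per-value linear first-hit scan of thresholds by a one-time
-- running-prefix-maxima pass plus a binary search per value (objective: faster).


-- ===== PORT A =====
-- inner 'for i, limiar in enumerate(thresholds): if valor < limiar: break' loop:
-- returns the index at which the break fired, none if no break fired
def pvA_loop (valor : Int) : List Int → Nat → Option Nat
  | [], _ => none
  | limiar :: rest, i => if valor < limiar then some i else pvA_loop valor rest (i + 1)

def peneira_multicamadas (dados : List Int) (thresholds : List Int) : List Int :=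
  dados.foldl (fun classes valor =>
    match pvA_loop valor thresholds 0 with
    | some i => classes ++ [(i : Int)]          -- classes.append(i); classificado = True
    | none => classes ++ [(thresholds.length : Int)])  -- if not classificado: append(len(thresholds))
    []

-- ===== PORT B =====
-- 'm = t if m is None or t > m else m', with m : Option Int for m = None
def pvB_mstep (m : Option Int) (t : Int) : Int :=
  match m with
  | none => t
  | some mv => if t > mv then t else mv

-- the 'for t in thresholds' loop building the running-maxima list pm
def pvB_pm : List Int → Option Int → List Int
  | [], _ => []
  | t :: ts, m => pvB_mstep m t :: pvB_pm ts (some (pvB_mstep m t))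

-- the 'while lo < hi' binary search (pm[mid] is always in range when called
-- with hi ≤ pm.length; getD 0 only makes the function total)
def pvB_bisect (pm : List Int) (v : Int) (lo hi : Nat) : Nat :=
  if h : lo < hi then
    if pm.getD ((lo + hi) / 2) 0 ≤ v then pvB_bisect pm v ((lo + hi) / 2 + 1) hi
    else pvB_bisect pm v lo ((lo + hi) / 2)
  else lo
termination_by hi - lo
decreasing_by all_goals omega

def peneira_multicamadas_alt (dados : List Int) (thresholds : List Int) : List Int :=
  let pm := pvB_pm thresholds none
  dados.foldl (fun res v => res ++ [(pvB_bisect pm v 0 pm.length : Int)]) []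

-- ===== PRECONDITION & SPEC =====
def Spec_peneira_multicamadas (dados : List Int) (thresholds : List Int) (out : List Int) : Prop := out = peneira_multicamadas_alt dados thresholds
instance (dados : List Int) (thresholds : List Int) (out : List Int) : Decidable (Spec_peneira_multicamadas dados thresholds out) := by unfold Spec_peneira_multicamadas; infer_instance

-- ===== CLAIM (what is proved, stated in full; the proofs are below) =====
def Claim_equal_peneira_multicamadas : Prop := ∀ (dados : List Int) (thresholds : List Int), Dom_peneira_multicamadas dados thresholds → Spec_peneira_multicamadas dados thresholds (peneira_multicamadas dados thresholds)

-- ===== LEMMAS AND PROOFS =====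

-- A's per-value class, as a Nat
def classA (v : Int) (ts : List Int) : Nat :=
  match pvA_loop v ts 0 with
  | some j => j
  | none => ts.length

theorem pvA_loop_succ (v : Int) (ts : List Int) : ∀ i : Nat,
    pvA_loop v ts (i + 1) = (pvA_loop v ts i).map (· + 1) := by
  induction ts with
  | nil => intro i; simp [pvA_loop]
  | cons t rest ih =>
    intro i
    by_cases h : v < t <;> simp [pvA_loop, h, ih]

theorem mstep_gt (m : Option Int) (t v : Int) (hm : ∀ mv, m = some mv → mv ≤ v)
    (h : v < t) : v < pvB_mstep m t := by
  cases m with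
  | none => simpa [pvB_mstep] using h
  | some mv => have := hm mv rfl; simp only [pvB_mstep]; split_ifs <;> omega

theorem mstep_le (m : Option Int) (t v : Int) (hm : ∀ mv, m = some mv → mv ≤ v)
    (h : t ≤ v) : pvB_mstep m t ≤ v := by
  cases m with
  | none => simpa [pvB_mstep] using h
  | some mv => have := hm mv rfl; simp only [pvB_mstep]; split_ifs <;> omega

-- every element of pvB_pm ts (some mv) is ≥ mv
theorem pm_ge : ∀ (ts : List Int) (mv x : Int),
    x ∈ pvB_pm ts (some mv) → mv ≤ x := by
  intro ts
  induction ts with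
  | nil => intro mv x hx; simp [pvB_pm] at hx
  | cons t rest ih =>
    intro mv x hx
    simp only [pvB_pm, List.mem_cons] at hx
    rcases hx with h | h
    · subst h; simp only [pvB_mstep]; split_ifs <;> omega
    · have := ih _ _ h
      simp only [pvB_mstep] at this
      split_ifs at this <;> omega

-- the running-maxima list is nondecreasing
theorem pm_pairwise : ∀ (ts : List Int) (m : Option Int),
    (pvB_pm ts m).Pairwise (· ≤ ·) := by
  intro ts
  induction ts with
  | nil => intro m; simp [pvB_pm]
  | cons t rest ih =>
    intro m
    exact List.pairwise_cons.mpr ⟨fun x hx => pm_ge rest _ x hx, ih _⟩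

-- key: A's first-hit index = number of running maxima ≤ v
theorem classA_eq_count : ∀ (ts : List Int) (v : Int) (m : Option Int),
    (∀ mv, m = some mv → mv ≤ v) →
    classA v ts = (pvB_pm ts m).countP (fun x => decide (x ≤ v)) := by
  intro ts
  induction ts with
  | nil => intro v m _; simp [classA, pvA_loop, pvB_pm]
  | cons t rest ih =>
    intro v m hm
    by_cases h : v < t
    · -- break at index 0; head maximum exceeds v, so all maxima exceed v
      have hgt : v < pvB_mstep m t := mstep_gt m t v hm h
      simp only [classA, pvA_loop, if_pos h]
      simp only [pvB_pm, List.countP_cons]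
      rw [List.countP_eq_zero.mpr]
      · simp; omega
      · intro x hx
        have := pm_ge rest _ x hx
        simp; omega
    · -- t ≤ v: both sides count 1 + recurse
      have hle : pvB_mstep m t ≤ v := mstep_le m t v hm (by omega)
      have hA : classA v (t :: rest) = classA v rest + 1 := by
        simp only [classA, pvA_loop, if_neg h, pvA_loop_succ]
        cases pvA_loop v rest 0 <;> simp
      simp only [pvB_pm, List.countP_cons]
      rw [hA, ih v (some (pvB_mstep m t)) (fun mv hmv => (Option.some.inj hmv) ▸ hle)]
      simp [hle]

-- countP of a list whose ≤-v elements are exactly the first k positions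
theorem count_prefix (v : Int) : ∀ (pm : List Int) (k : Nat),
    k ≤ pm.length →
    (∀ i (h : i < pm.length), i < k → pm[i] ≤ v) →
    (∀ i (h : i < pm.length), k ≤ i → ¬ pm[i] ≤ v) →
    pm.countP (fun x => decide (x ≤ v)) = k := by
  intro pm
  induction pm with
  | nil => intro k hk _ _; simp at hk ⊢; omega
  | cons x rest ih =>
    intro k hk h1 h2
    cases k with
    | zero =>
      rw [List.countP_eq_zero.mpr]
      intro y hy
      rcases List.mem_iff_getElem.mp hy with ⟨i, hi, rfl⟩
      have := h2 i (by simpa using hi) (Nat.zero_le _)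
      simpa using this
    | succ k' =>
      have hx : x ≤ v := by
        have := h1 0 (by simp) (Nat.succ_pos _)
        simpa using this
      simp only [List.countP_cons]
      rw [ih k' (by simpa using hk)
        (fun i hi hik => by
          have := h1 (i + 1) (by simpa using hi) (by omega)
          simpa using this)
        (fun i hi hik => by
          have := h2 (i + 1) (by simpa using hi) (by omega)
          simpa using this)]
      simp [hx]

-- binary-search invariant
theorem bisect_inv : ∀ (k : Nat) (pm : List Int) (v : Int) (lo hi : Nat),
    hi - lo = k →
    pm.Pairwise (· ≤ ·) →
    hi ≤ pm.length →
    lo ≤ hi →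
    (∀ i (h : i < pm.length), i < lo → pm[i] ≤ v) →
    (∀ i (h : i < pm.length), hi ≤ i → ¬ pm[i] ≤ v) →
    pvB_bisect pm v lo hi = pm.countP (fun x => decide (x ≤ v)) := by
  intro k
  induction k using Nat.strong_induction_on with
  | _ k IH =>
    intro pm v lo hi hk hs hhi hlh h1 h2
    have hmono : ∀ i j (hi' : i < pm.length) (hj : j < pm.length), i < j → pm[i] ≤ pm[j] :=
      fun i j hi' hj hij => List.pairwise_iff_getElem.mp hs i j hi' hj hij
    rw [pvB_bisect]
    by_cases h : lo < hi
    · rw [dif_pos h]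
      have hmid : (lo + hi) / 2 < pm.length := by omega
      have hget : pm.getD ((lo + hi) / 2) 0 = pm[(lo + hi) / 2] :=
        List.getD_eq_getElem pm 0 hmid
      by_cases hc : pm.getD ((lo + hi) / 2) 0 ≤ v
      · rw [if_pos hc]
        rw [hget] at hc
        exact IH (hi - ((lo + hi) / 2 + 1)) (by omega) pm v _ hi rfl hs hhi (by omega)
          (fun i hi' hik => by
            rcases Nat.lt_or_ge i lo with hl | hl
            · exact h1 i hi' hl
            · rcases Nat.lt_or_ge i ((lo + hi) / 2) with hm2 | hm2
              · exact le_trans (hmono i _ hi' hmid hm2) hc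
              · have hieq : i = (lo + hi) / 2 := by omega
                subst hieq; exact hc)
          h2
      · rw [if_neg hc]
        rw [hget] at hc
        exact IH ((lo + hi) / 2 - lo) (by omega) pm v lo _ rfl hs (by omega) (by omega) h1
          (fun i hi' hik => by
            rcases Nat.lt_or_ge i ((lo + hi) / 2 + 1) with hm2 | hm2
            · have hieq : i = (lo + hi) / 2 := by omega
              subst hieq; exact hc
            · intro hle
              exact hc (le_trans (hmono _ i hmid hi' (by omega)) hle))
    · rw [dif_neg h]
      have heq : lo = hi := by omega
      subst heq
      exact (count_prefix v pm lo hhi h1 (fun i hi' hik => h2 i hi' hik)).symm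

theorem bisect_count (pm : List Int) (v : Int) (hs : pm.Pairwise (· ≤ ·)) :
    pvB_bisect pm v 0 pm.length = pm.countP (fun x => decide (x ≤ v)) :=
  bisect_inv (pm.length - 0) pm v 0 pm.length rfl hs (le_refl _)
    (Nat.zero_le _) (fun i _ hi0 => absurd hi0 (Nat.not_lt_zero i))
    (fun i hi' hik => absurd hi' (by omega))

-- per-value agreement
theorem per_value (v : Int) (ts : List Int) :
    (match pvA_loop v ts 0 with
      | some i => (i : Int)
      | none => (ts.length : Int)) =
    ((pvB_bisect (pvB_pm ts none) v 0 (pvB_pm ts none).length : Nat) : Int) := by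
  have h1 : classA v ts = pvB_bisect (pvB_pm ts none) v 0 (pvB_pm ts none).length := by
    rw [bisect_count _ _ (pm_pairwise ts none)]
    exact classA_eq_count ts v none (by intro mv hmv; cases hmv)
  have h2 : (match pvA_loop v ts 0 with
      | some i => (i : Int)
      | none => (ts.length : Int)) = (classA v ts : Int) := by
    unfold classA
    cases pvA_loop v ts 0 <;> simp
  rw [h2, h1]

-- A's fold builds acc ++ map f dados
theorem foldA (ts : List Int) : ∀ (l acc : List Int),
    l.foldl (fun classes valor =>
      match pvA_loop valor ts 0 with
      | some i => classes ++ [(i : Int)]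
      | none => classes ++ [(ts.length : Int)]) acc
    = acc ++ l.map (fun v =>
      match pvA_loop v ts 0 with
      | some i => (i : Int)
      | none => (ts.length : Int)) := by
  intro l
  induction l with
  | nil => intro acc; simp
  | cons x rest ih =>
    intro acc
    simp only [List.foldl_cons, List.map_cons, ih]
    cases pvA_loop x ts 0 <;> simp

-- B's fold builds acc ++ map f dados
theorem foldB (pm : List Int) : ∀ (l acc : List Int),
    l.foldl (fun res v => res ++ [(pvB_bisect pm v 0 pm.length : Int)]) acc
    = acc ++ l.map (fun v => (pvB_bisect pm v 0 pm.length : Int)) := by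
  intro l
  induction l with
  | nil => intro acc; simp
  | cons x rest ih => intro acc; simp [ih]

-- ===== VERDICT (by name: the statement is the Claim_ definition above) =====
theorem peneira_multicamadas_spec : Claim_equal_peneira_multicamadas := by
  intro dados thresholds _
  unfold Spec_peneira_multicamadas peneira_multicamadas
  simp only [peneira_multicamadas_alt]
  rw [foldA thresholds dados [], foldB (pvB_pm thresholds none) dados []]
  simp only [List.nil_append]
  exact List.map_congr_left (fun v _ => per_value v thresholds)
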